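-- pv_equiv track=rewrite | github.com/Dan-Lore/BurnToSolve2024 | Рекуррентные соотношения/Задача 0.6. Палиндром.py | solve
-- ===== SOURCE A (Python) =====
-- def solve(s):
--     n = len(s)
--     dp = [[0] * n for _ in range(n)]
--
--     for length in range(2, n + 1):
--         for start in range(n - length + 1):
--             end = start + length - 1
--             if s[start] == s[end]:
--                 dp[start][end] = dp[start + 1][end - 1]
--             else:
--                 dp[start][end] = 1 + min(dp[start][end - 1], dp[start + 1][end])
--
--     palindromic_string = []
--     i, j = 0, n - 1
--     while i < j:
--         if s[i] == s[j]:
--             palindromic_string.append(s[i])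
--             i += 1
--             j -= 1
--         elif dp[i][j] == dp[i + 1][j] + 1:
--             i += 1
--         elif dp[i][j] == dp[i][j - 1] + 1:
--             j -= 1
--
--     result = ''.join(palindromic_string)
--     if i == j:
--         result += s[i] + ''.join(reversed(result))
--     else:
--         result += ''.join(reversed(result))
--
--     return result
-- ===== SOURCE B (Python) =====
-- def solve(s):
--     memo = {}
--
--     def dp(i, j):
--         if i >= j:
--             return 0
--         if (i, j) in memo:
--             return memo[(i, j)]
--         if s[i] == s[j]:
--             r = dp(i + 1, j - 1)
--         else:
--             r = 1 + min(dp(i + 1, j), dp(i, j - 1))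
--         memo[(i, j)] = r
--         return r
--
--     def build(i, j):
--         if i > j:
--             return ''
--         if i == j:
--             return s[i]
--         if s[i] == s[j]:
--             return s[i] + build(i + 1, j - 1) + s[i]
--         if dp(i, j) == dp(i + 1, j) + 1:
--             return build(i + 1, j)
--         return build(i, j - 1)
--
--     return build(0, len(s) - 1)
-- ===== Notes on version B (the rewrite author's own statement) =====
-- stated objective: alternative
-- what changed: Replaces A's bottom-up n*n table fill plus iterative while-loop traceback (appending matched characters and mirroring at the end) with a memoized recursive dp(i,j) and a recursive build(i,j) that returns the palindromic string directly by divide-and-conquer over intervals.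
import Mathlib
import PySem

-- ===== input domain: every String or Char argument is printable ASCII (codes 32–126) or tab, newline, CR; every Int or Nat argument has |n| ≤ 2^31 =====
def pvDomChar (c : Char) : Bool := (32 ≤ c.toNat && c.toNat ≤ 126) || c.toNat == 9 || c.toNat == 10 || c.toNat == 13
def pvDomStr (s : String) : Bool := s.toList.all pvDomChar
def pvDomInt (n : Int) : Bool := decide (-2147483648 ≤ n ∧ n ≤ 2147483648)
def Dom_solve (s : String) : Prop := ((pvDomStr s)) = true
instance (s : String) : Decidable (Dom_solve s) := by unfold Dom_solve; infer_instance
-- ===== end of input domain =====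

-- B is a different decomposition of the same computation: a memoized recursive dp plus a recursive
-- build(i, j) that returns the string directly, replacing A's bottom-up table fill + iterative traceback.

-- s[i] for an index that is always in range at every use site in both programs (0 ≤ i < len s)
def sGet (c : List Char) (i : Int) : Char := (PySem.List.pyGet? c i).getD ' '

-- ===== PORT A =====
-- dp[i][j] read / write on the list-of-lists table (indices are provably in range at every use)
def tG (dp : List (List Int)) (i j : Int) : Int :=
  PySem.List.pyGetD (PySem.List.pyGetD dp i []) j 0

def tS (dp : List (List Int)) (i j v : Int) : List (List Int) :=
  PySem.List.pySetD dp i (PySem.List.pySetD (PySem.List.pyGetD dp i []) j v)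

def solveFillA (c : List Char) (n : Int) : List (List Int) :=
  (PySem.List.pyRange 2 (n + 1) 1).foldl (fun dp length =>
    (PySem.List.pyRange 0 (n - length + 1) 1).foldl (fun dp start =>
      let e := start + length - 1
      tS dp start e
        (if sGet c start == sGet c e then tG dp (start + 1) (e - 1)
         else 1 + min (tG dp start (e - 1)) (tG dp (start + 1) e))) dp)
    ((PySem.List.pyRange 0 n 1).map (fun _ => PySem.List.pyRepeat [(0 : Int)] n))

-- the while-loop traceback; fuel bounds the number of iterations (fuel = len(s) suffices, proved
-- below); the final fall-through case is unreachable (proved; Python would loop forever there)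
def solveLoopA (c : List Char) (dp : List (List Int)) :
    Nat → Int → Int → List Char → List Char × Int × Int
  | 0, i, j, acc => (acc, i, j)
  | fuel + 1, i, j, acc =>
    if i < j then
      if sGet c i == sGet c j then
        solveLoopA c dp fuel (i + 1) (j - 1) (acc ++ [sGet c i])
      else if tG dp i j == tG dp (i + 1) j + 1 then
        solveLoopA c dp fuel (i + 1) j acc
      else if tG dp i j == tG dp i (j - 1) + 1 then
        solveLoopA c dp fuel i (j - 1) acc
      else (acc, i, j)
    else (acc, i, j)

def solve (s : String) : String :=
  let c := s.toList
  let n : Int := c.length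
  let dp := solveFillA c n
  let r := solveLoopA c dp c.length 0 (n - 1) []
  if r.2.1 = r.2.2 then String.ofList (r.1 ++ [sGet c r.2.1] ++ r.1.reverse)
  else String.ofList (r.1 ++ r.1.reverse)

-- ===== PORT B =====
-- memoized recursive dp(i, j): returns the value together with the updated memo dict
def dpB (c : List Char) (i j : Int) (memo : PySem.Dict (Int × Int) Int) :
    Int × PySem.Dict (Int × Int) Int :=
  if _h : i ≥ j then (0, memo)
  else
    match memo.get? (i, j) with
    | some v => (v, memo)
    | none =>
      let p :=
        if sGet c i == sGet c j then dpB c (i + 1) (j - 1) memo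
        else
          let q1 := dpB c (i + 1) j memo
          let q2 := dpB c i (j - 1) q1.2
          (1 + min q1.1 q2.1, q2.2)
      (p.1, p.2.insert (i, j) p.1)
termination_by (j - i).toNat
decreasing_by all_goals omega

-- recursive build(i, j), threading the shared memo through the dp calls
def buildB (c : List Char) (i j : Int) (memo : PySem.Dict (Int × Int) Int) :
    List Char × PySem.Dict (Int × Int) Int :=
  if _h : i > j then ([], memo)
  else if _h2 : i = j then ([sGet c i], memo)
  else if sGet c i == sGet c j then
    let r := buildB c (i + 1) (j - 1) memo
    (sGet c i :: r.1 ++ [sGet c i], r.2)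
  else
    let d0 := dpB c i j memo
    let d1 := dpB c (i + 1) j d0.2
    if d0.1 == d1.1 + 1 then buildB c (i + 1) j d1.2
    else buildB c i (j - 1) d1.2
termination_by (j - i).toNat
decreasing_by all_goals omega

def solve_alt (s : String) : String :=
  let c := s.toList
  String.ofList (buildB c 0 ((c.length : Int) - 1) PySem.Dict.empty).1

-- ===== PRECONDITION & SPEC =====
def Spec_solve (s : String) (out : String) : Prop := out = solve_alt s
instance (s : String) (out : String) : Decidable (Spec_solve s out) := by unfold Spec_solve; infer_instance

-- ===== CLAIM (what is proved, stated in full; the proofs are below) =====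
def Claim_equal_solve : Prop := ∀ (s : String), Dom_solve s → Spec_solve s (solve s)

-- ===== LEMMAS AND PROOFS =====

-- pure reference recursion for the dp value
def dpR (c : List Char) (i j : Int) : Int :=
  if i ≥ j then 0
  else if sGet c i == sGet c j then dpR c (i + 1) (j - 1)
  else 1 + min (dpR c (i + 1) j) (dpR c i (j - 1))
termination_by (j - i).toNat
decreasing_by all_goals omega

-- pure reference recursion for the built string
def bR (c : List Char) (i j : Int) : List Char :=
  if i > j then []
  else if i = j then [sGet c i]
  else if sGet c i == sGet c j then sGet c i :: bR c (i + 1) (j - 1) ++ [sGet c i]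
  else if dpR c i j = dpR c (i + 1) j + 1 then bR c (i + 1) j
  else bR c i (j - 1)
termination_by (j - i).toNat
decreasing_by all_goals omega

theorem dpR_ge (c : List Char) {i j : Int} (h : i ≥ j) : dpR c i j = 0 := by
  rw [dpR.eq_def]; simp [h]

theorem dpR_lt (c : List Char) {i j : Int} (h : i < j) :
    dpR c i j = if sGet c i == sGet c j then dpR c (i + 1) (j - 1)
                else 1 + min (dpR c (i + 1) j) (dpR c i (j - 1)) := by
  rw [dpR.eq_def]; rw [if_neg (by omega)]

-- ## B side: agreement of the memoized recursion with dpR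
def GoodMemo (c : List Char) (memo : PySem.Dict (Int × Int) Int) : Prop :=
  ∀ p v, memo.get? p = some v → v = dpR c p.1 p.2

theorem goodMemo_insert (c : List Char) (memo : PySem.Dict (Int × Int) Int)
    (i j v : Int) (h : GoodMemo c memo) (hv : v = dpR c i j) :
    GoodMemo c (memo.insert (i, j) v) := by
  intro p w hpw
  rw [PySem.Dict.get?_insert] at hpw
  split at hpw
  · next heq =>
    cases hpw; subst heq; exact hv
  · exact h p w hpw

theorem dpB_correct_aux (c : List Char) :
    ∀ n : Nat, ∀ i j : Int, ∀ memo : PySem.Dict (Int × Int) Int,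
      (j - i).toNat ≤ n → GoodMemo c memo →
      (dpB c i j memo).1 = dpR c i j ∧ GoodMemo c (dpB c i j memo).2 := by
  intro n
  induction n with
  | zero =>
    intro i j memo hn h
    have hij : i ≥ j := by omega
    rw [dpB, dpR_ge c hij]
    simp [hij, h]
  | succ n ih =>
    intro i j memo hn h
    by_cases hij : i ≥ j
    · rw [dpB, dpR_ge c hij]; simp [hij, h]
    · have hij' : i < j := by omega
      rw [dpB]
      rw [dif_neg (by omega : ¬ i ≥ j)]
      cases hm : memo.get? (i, j) with
      | some v =>
        simp only
        exact ⟨h (i, j) v hm, h⟩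
      | none =>
        simp only
        rw [dpR_lt c hij']
        cases hc : (sGet c i == sGet c j) with
        | true =>
          obtain ⟨h1, h2⟩ := ih (i + 1) (j - 1) memo (by omega) h
          simp only [hc, if_true]
          exact ⟨h1, goodMemo_insert c _ i j _ h2 (by rw [h1, dpR_lt c hij', hc, if_pos rfl])⟩
        | false =>
          obtain ⟨h1, h2⟩ := ih (i + 1) j memo (by omega) h
          obtain ⟨h3, h4⟩ := ih i (j - 1) (dpB c (i + 1) j memo).2 (by omega) h2
          simp only [hc, if_false, Bool.false_eq_true]
          refine ⟨by rw [h1, h3], ?_⟩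
          exact goodMemo_insert c _ i j _ h4 (by rw [h1, h3, dpR_lt c hij', hc]; simp)
  
theorem dpB_correct (c : List Char) (i j : Int) (memo : PySem.Dict (Int × Int) Int)
    (h : GoodMemo c memo) :
    (dpB c i j memo).1 = dpR c i j ∧ GoodMemo c (dpB c i j memo).2 :=
  dpB_correct_aux c (j - i).toNat i j memo le_rfl h

theorem buildB_correct_aux (c : List Char) :
    ∀ n : Nat, ∀ i j : Int, ∀ memo : PySem.Dict (Int × Int) Int,
      (j - i).toNat ≤ n → GoodMemo c memo →
      (buildB c i j memo).1 = bR c i j ∧ GoodMemo c (buildB c i j memo).2 := by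
  intro n
  induction n with
  | zero =>
    intro i j memo hn h
    rw [buildB, bR.eq_def]
    by_cases h1 : i > j
    · simp [h1, h]
    · have h2 : i = j := by omega
      simp [h1, h2, h]
  | succ n ih =>
    intro i j memo hn h
    rw [buildB, bR.eq_def]
    by_cases h1 : i > j
    · simp [h1, h]
    · by_cases h2 : i = j
      · simp [h1, h2, h]
      · rw [dif_neg h1, dif_neg h2, if_neg h1, if_neg h2]
        have hij : i < j := by omega
        cases hc : (sGet c i == sGet c j) with
        | true =>
          simp only [hc, if_true]
          obtain ⟨hb1, hb2⟩ := ih (i + 1) (j - 1) memo (by omega) h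
          exact ⟨by rw [hb1], hb2⟩
        | false =>
          simp only [hc, if_false, Bool.false_eq_true]
          obtain ⟨hd1, hd2⟩ := dpB_correct c i j memo h
          obtain ⟨hd3, hd4⟩ := dpB_correct c (i + 1) j (dpB c i j memo).2 hd2
          by_cases hcnd : dpR c i j = dpR c (i + 1) j + 1
          · rw [if_pos (by rw [hd1, hd3]; simp [hcnd]), if_pos hcnd]
            exact ih (i + 1) j _ (by omega) hd4
          · rw [if_neg (by rw [hd1, hd3]; simp [hcnd]), if_neg hcnd]
            exact ih i (j - 1) _ (by omega) hd4

theorem goodMemo_empty (c : List Char) : GoodMemo c PySem.Dict.empty := by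
  intro p v h
  rw [PySem.Dict.get?_empty] at h
  cases h

-- ## A side: the filled table agrees with dpR on 0 <= x <= y < n

-- structural facts about the table: n rows, each of length n
def TabOK (n : Nat) (dp : List (List Int)) : Prop :=
  dp.length = n ∧ ∀ (k : Nat) (hk : k < dp.length), dp[k].length = n

theorem pyGetD_pySetD_int {α : Type} {xs : List α} {i m : Int} (w : α) (d : α)
    (h0 : 0 ≤ i) (hm0 : 0 ≤ m) (h : i < (xs.length : Int)) :
    PySem.List.pyGetD (PySem.List.pySetD xs i w) m d
      = if m = i then w else PySem.List.pyGetD xs m d := by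
  rw [show i = ((i.toNat : Nat) : Int) from (Int.toNat_of_nonneg h0).symm,
      show m = ((m.toNat : Nat) : Int) from (Int.toNat_of_nonneg hm0).symm]
  rw [PySem.List.pyGetD_pySetD_natCast xs i.toNat m.toNat w d (by omega)]
  exact if_congr (by omega) rfl rfl

theorem row_len (c : List Char) (dp : List (List Int)) (hOK : TabOK c.length dp)
    {i : Int} (hi0 : 0 ≤ i) (hi : i < (c.length : Int)) :
    (PySem.List.pyGetD dp i ([] : List Int)).length = c.length := by
  obtain ⟨hlen, hrow⟩ := hOK
  rw [PySem.List.pyGetD_eq_getElem dp [] hi0 (by omega)]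
  exact hrow i.toNat (by omega)

theorem TabOK_tS (c : List Char) (dp : List (List Int)) (hOK : TabOK c.length dp)
    {i : Int} (j v : Int) (hi0 : 0 ≤ i) (hi : i < (c.length : Int)) :
    TabOK c.length (tS dp i j v) := by
  have hrl := row_len c dp hOK hi0 hi
  obtain ⟨hlen, hrow⟩ := hOK
  constructor
  · unfold tS; rw [PySem.List.length_pySetD]; exact hlen
  · intro k hk
    unfold tS at hk ⊢
    simp only [PySem.List.pySetD_of_nonneg dp _ hi0] at hk ⊢
    rw [List.getElem_set]
    by_cases hik : i.toNat = k
    · rw [if_pos hik, PySem.List.length_pySetD]; exact hrl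
    · rw [if_neg hik]
      exact hrow k (by rw [List.length_set] at hk; exact hk)

theorem tG_tS (c : List Char) (dp : List (List Int)) (hOK : TabOK c.length dp)
    {i j x y : Int} (v : Int)
    (hi0 : 0 ≤ i) (hi : i < (c.length : Int)) (hj0 : 0 ≤ j) (_hj : j < (c.length : Int))
    (hx0 : 0 ≤ x) (hx : x < (c.length : Int)) (hy0 : 0 ≤ y) (hy : y < (c.length : Int)) :
    tG (tS dp i j v) x y = if x = i ∧ y = j then v else tG dp x y := by
  have hrl := row_len c dp hOK hi0 hi
  obtain ⟨hlen, hrow⟩ := hOK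
  unfold tS tG
  rw [pyGetD_pySetD_int _ [] hi0 hx0 (by omega)]
  by_cases hxi : x = i
  · rw [if_pos hxi]
    rw [pyGetD_pySetD_int _ 0 hj0 hy0 (by omega)]
    by_cases hyj : y = j
    · rw [if_pos hyj, if_pos ⟨hxi, hyj⟩]
    · rw [if_neg hyj, if_neg (by tauto), hxi]
  · rw [if_neg hxi, if_neg (by tauto)]

theorem TabOK_init (c : List Char) :
    TabOK c.length
      ((PySem.List.pyRange 0 (c.length : Int) 1).map
        (fun _ => PySem.List.pyRepeat [(0 : Int)] (c.length : Int))) := by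
  constructor
  · simp [PySem.List.length_pyRange_one]
  · intro k hk
    simp only [List.getElem_map]
    rw [PySem.List.pyRepeat_singleton]
    simp

theorem tG_init (c : List Char) {x y : Int}
    (hx0 : 0 ≤ x) (hx : x < (c.length : Int)) (hy0 : 0 ≤ y) (hy : y < (c.length : Int)) :
    tG ((PySem.List.pyRange 0 (c.length : Int) 1).map
        (fun _ => PySem.List.pyRepeat [(0 : Int)] (c.length : Int))) x y = 0 := by
  unfold tG
  rw [PySem.List.pyGetD_eq_getElem _ [] hx0
    (by rw [List.length_map, PySem.List.length_pyRange_one]; omega)]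
  rw [List.getElem_map, PySem.List.pyRepeat_singleton]
  rw [PySem.List.pyGetD_eq_getElem _ 0 hy0 (by rw [List.length_replicate]; omega)]
  simp

-- loop invariant for the table fill: entries of width < L are final, plus, on the current row of
-- widths, those whose start is below s0; everything else still holds its initial 0
def InvW (c : List Char) (L s0 : Int) (dp : List (List Int)) : Prop :=
  ∀ x y : Int, 0 ≤ x → x < (c.length : Int) → 0 ≤ y → y < (c.length : Int) →
    tG dp x y =
      if x < y ∧ (y - x + 1 < L ∨ (y - x + 1 = L ∧ x < s0)) then dpR c x y else 0

theorem tG_small {c : List Char} {L s0 : Int} {dp : List (List Int)} (hInv : InvW c L s0 dp)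
    {x y : Int} (hx0 : 0 ≤ x) (hx : x < (c.length : Int)) (hy0 : 0 ≤ y)
    (hy : y < (c.length : Int)) (hw : y - x + 1 < L) :
    tG dp x y = dpR c x y := by
  rw [hInv x y hx0 hx hy0 hy]
  by_cases hxy : x < y
  · rw [if_pos ⟨hxy, Or.inl hw⟩]
  · rw [if_neg (fun h => hxy h.1), dpR_ge c (by omega)]

theorem innerStep (c : List Char) (L : Int) (hL2 : 2 ≤ L) (hLn : L ≤ (c.length : Int)) :
    ∀ (m : Nat) (a : Int) (dp : List (List Int)), 0 ≤ a →
      a + m = (c.length : Int) - L + 1 → TabOK c.length dp → InvW c L a dp →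
      TabOK c.length
        ((PySem.List.pyRange a ((c.length : Int) - L + 1) 1).foldl (fun dp start =>
          let e := start + L - 1
          tS dp start e
            (if sGet c start == sGet c e then tG dp (start + 1) (e - 1)
             else 1 + min (tG dp start (e - 1)) (tG dp (start + 1) e))) dp) ∧
      InvW c L ((c.length : Int) - L + 1)
        ((PySem.List.pyRange a ((c.length : Int) - L + 1) 1).foldl (fun dp start =>
          let e := start + L - 1
          tS dp start e
            (if sGet c start == sGet c e then tG dp (start + 1) (e - 1)
             else 1 + min (tG dp start (e - 1)) (tG dp (start + 1) e))) dp) := by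
  intro m
  induction m with
  | zero =>
    intro a dp ha0 ham hOK hInv
    have ha : a = (c.length : Int) - L + 1 := by omega
    rw [PySem.List.pyRange_one_eq_nil (by omega)]
    subst ha
    exact ⟨hOK, hInv⟩
  | succ m ih =>
    intro a dp ha0 ham hOK hInv
    have ha : a < (c.length : Int) - L + 1 := by omega
    rw [PySem.List.pyRange_one_cons (by omega), List.foldl_cons]
    have he1 : a < a + L - 1 := by omega
    have he2 : a + L - 1 < (c.length : Int) := by omega
    have hv : (if sGet c a == sGet c (a + L - 1) then tG dp (a + 1) (a + L - 1 - 1)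
               else 1 + min (tG dp a (a + L - 1 - 1)) (tG dp (a + 1) (a + L - 1)))
              = dpR c a (a + L - 1) := by
      rw [dpR_lt c he1]
      cases hch : (sGet c a == sGet c (a + L - 1)) with
      | true =>
        simp only [if_true]
        exact tG_small hInv (by omega) (by omega) (by omega) (by omega) (by omega)
      | false =>
        simp only [Bool.false_eq_true, if_false]
        rw [tG_small hInv (by omega) (by omega) (by omega) (by omega) (by omega),
            tG_small hInv (by omega) (by omega) (by omega) (by omega) (by omega)]
        rw [min_comm]
    have hOK' : TabOK c.length
        (tS dp a (a + L - 1)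
          (if sGet c a == sGet c (a + L - 1) then tG dp (a + 1) (a + L - 1 - 1)
           else 1 + min (tG dp a (a + L - 1 - 1)) (tG dp (a + 1) (a + L - 1)))) :=
      TabOK_tS c dp hOK _ _ (by omega) (by omega)
    have hInv' : InvW c L (a + 1)
        (tS dp a (a + L - 1)
          (if sGet c a == sGet c (a + L - 1) then tG dp (a + 1) (a + L - 1 - 1)
           else 1 + min (tG dp a (a + L - 1 - 1)) (tG dp (a + 1) (a + L - 1)))) := by
      intro x y hx0 hx hy0 hy
      rw [tG_tS c dp hOK _ (by omega) (by omega) (by omega) (by omega) hx0 hx hy0 hy]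
      by_cases hxy : x = a ∧ y = a + L - 1
      · obtain ⟨hxa, hye⟩ := hxy
        rw [if_pos (show x = a ∧ y = a + L - 1 from ⟨hxa, hye⟩)]
        rw [if_pos (show x < y ∧ (y - x + 1 < L ∨ (y - x + 1 = L ∧ x < a + 1)) from
          ⟨by omega, Or.inr ⟨by omega, by omega⟩⟩)]
        rw [hxa, hye]
        exact hv
      · rw [if_neg hxy, hInv x y hx0 hx hy0 hy]
        refine if_congr ?_ rfl rfl
        constructor
        · rintro ⟨h1, h2 | h2⟩
          · exact ⟨h1, Or.inl h2⟩
          · exact ⟨h1, Or.inr ⟨h2.1, by omega⟩⟩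
        · rintro ⟨h1, h2 | h2⟩
          · exact ⟨h1, Or.inl h2⟩
          · refine ⟨h1, Or.inr ⟨h2.1, ?_⟩⟩
            rcases h2 with ⟨hw, hxlt⟩
            by_contra hxa
            have : x = a := by omega
            exact hxy ⟨this, by omega⟩
      
    exact ih (a + 1) _ (by omega) (by omega) hOK' hInv'

theorem InvW_shift {c : List Char} {L : Int} {dp : List (List Int)}
    (h : InvW c L ((c.length : Int) - L + 1) dp) : InvW c (L + 1) 0 dp := by
  intro x y hx0 hx hy0 hy
  rw [h x y hx0 hx hy0 hy]
  refine if_congr ?_ rfl rfl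
  constructor
  · rintro ⟨h1, h2 | h2⟩
    · exact ⟨h1, Or.inl (by omega)⟩
    · exact ⟨h1, Or.inl (by omega)⟩
  · rintro ⟨h1, h2 | h2⟩
    · rcases lt_or_ge (y - x + 1) L with hw | hw
      · exact ⟨h1, Or.inl hw⟩
      · exact ⟨h1, Or.inr ⟨by omega, by omega⟩⟩
    · exact absurd h2.2 (by omega)

theorem outerStep (c : List Char) :
    ∀ (m : Nat) (a : Int), 2 ≤ a → a + m = (c.length : Int) + 1 →
      ∀ dp : List (List Int), TabOK c.length dp → InvW c a 0 dp →
      InvW c ((c.length : Int) + 1) 0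
        ((PySem.List.pyRange a ((c.length : Int) + 1) 1).foldl (fun dp length =>
          (PySem.List.pyRange 0 ((c.length : Int) - length + 1) 1).foldl (fun dp start =>
            let e := start + length - 1
            tS dp start e
              (if sGet c start == sGet c e then tG dp (start + 1) (e - 1)
               else 1 + min (tG dp start (e - 1)) (tG dp (start + 1) e))) dp) dp) := by
  intro m
  induction m with
  | zero =>
    intro a ha2 ham dp hOK hInv
    have ha : a = (c.length : Int) + 1 := by omega
    rw [PySem.List.pyRange_one_eq_nil (by omega)]
    subst ha
    exact hInv
  | succ m ih =>
    intro a ha2 ham dp hOK hInv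
    have ha : a ≤ (c.length : Int) := by omega
    rw [PySem.List.pyRange_one_cons (by omega), List.foldl_cons]
    obtain ⟨hOK', hInv'⟩ := innerStep c a ha2 ha ((c.length : Int) - a + 1).toNat 0 dp
      le_rfl (by omega) hOK hInv
    exact ih (a + 1) (by omega) (by omega) _ hOK' (InvW_shift hInv')

theorem fillA_correct (c : List Char) :
    ∀ x y : Int, 0 ≤ x → x ≤ y → y < (c.length : Int) →
      tG (solveFillA c (c.length : Int)) x y = dpR c x y := by
  intro x y hx0 hxy hy
  unfold solveFillA
  by_cases hN : 2 ≤ (c.length : Int)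
  · have hfin := outerStep c ((c.length : Int) - 1).toNat 2 le_rfl (by omega)
      _ (TabOK_init c) (by
        intro x y hx0 hx hy0 hy
        rw [tG_init c hx0 hx hy0 hy, if_neg (by omega)])
    rw [hfin x y hx0 (by omega) (by omega) hy]
    by_cases hlt : x < y
    · rw [if_pos ⟨hlt, Or.inl (by omega)⟩]
    · rw [if_neg (fun h => hlt h.1), dpR_ge c (by omega)]
  · rw [PySem.List.pyRange_one_eq_nil (show (c.length : Int) + 1 ≤ 2 by omega), List.foldl_nil]
    rw [tG_init c hx0 (by omega) (by omega) hy]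
    rw [dpR_ge c (by omega)]


theorem loopA_correct (c : List Char) (dp : List (List Int))
    (hdp : ∀ x y : Int, 0 ≤ x → x ≤ y → y < (c.length : Int) → tG dp x y = dpR c x y) :
    ∀ fuel : Nat, ∀ i j : Int, ∀ acc : List Char,
      0 ≤ i → j < (c.length : Int) → (j - i).toNat ≤ fuel →
      (if (solveLoopA c dp fuel i j acc).2.1 = (solveLoopA c dp fuel i j acc).2.2 then
          (solveLoopA c dp fuel i j acc).1 ++ [sGet c (solveLoopA c dp fuel i j acc).2.1] ++
            (solveLoopA c dp fuel i j acc).1.reverse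
        else (solveLoopA c dp fuel i j acc).1 ++ (solveLoopA c dp fuel i j acc).1.reverse)
        = acc ++ bR c i j ++ acc.reverse := by
  intro fuel
  induction fuel with
  | zero =>
    intro i j acc hi hj hf
    have hij : j ≤ i := by omega
    rw [solveLoopA]
    by_cases h2 : i = j
    · rw [bR.eq_def]; simp [h2, List.append_assoc]
    · rw [bR.eq_def]; have : i > j := by omega
      simp [if_neg (by omega : ¬ i < j), this, if_neg h2, List.append_assoc]
  | succ fuel ih =>
    intro i j acc hi hj hf
    by_cases hij : i < j
    · rw [solveLoopA, if_pos hij]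
      have hdpij : tG dp i j = dpR c i j := hdp i j hi (by omega) hj
      have hdpi1 : tG dp (i + 1) j = dpR c (i + 1) j := hdp (i + 1) j (by omega) (by omega) hj
      have hdpj1 : tG dp i (j - 1) = dpR c i (j - 1) := hdp i (j - 1) hi (by omega) (by omega)
      rw [bR.eq_def, if_neg (by omega : ¬ i > j), if_neg (by omega : ¬ i = j)]
      cases hc : (sGet c i == sGet c j) with
      | true =>
        simp only [hc, if_true]
        rw [ih (i + 1) (j - 1) (acc ++ [sGet c i]) (by omega) (by omega) (by omega)]
        simp [List.append_assoc]
      | false =>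
        simp only [Bool.false_eq_true, if_false]
        by_cases hcnd : dpR c i j = dpR c (i + 1) j + 1
        · have hb1 : (tG dp i j == tG dp (i + 1) j + 1) = true := by
            rw [hdpij, hdpi1]; simp [hcnd]
          rw [hb1, if_pos (show (true : Bool) = true from rfl), if_pos hcnd]
          exact ih (i + 1) j acc (by omega) hj (by omega)
        · have hmin : dpR c i j = 1 + min (dpR c (i + 1) j) (dpR c i (j - 1)) := by
            rw [dpR_lt c hij]; simp [hc]
          have hcnd2 : dpR c i j = dpR c i (j - 1) + 1 := by
            rcases min_choice (dpR c (i + 1) j) (dpR c i (j - 1)) with hm | hm <;> omega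
          have hb1 : (tG dp i j == tG dp (i + 1) j + 1) = false := by
            rw [hdpij, hdpi1]; simp [hcnd]
          have hb2 : (tG dp i j == tG dp i (j - 1) + 1) = true := by
            rw [hdpij, hdpj1]; simp [hcnd2]
          rw [hb1, if_neg (show ¬ (false = true) by simp), if_neg hcnd]
          rw [hb2, if_pos (show (true : Bool) = true from rfl)]
          exact ih i (j - 1) acc hi (by omega) (by omega)
    · rw [solveLoopA, if_neg hij]
      by_cases h2 : i = j
      · rw [bR.eq_def]; simp [h2, List.append_assoc]
      · rw [bR.eq_def]; have : i > j := by omega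
        simp [this, if_neg h2, List.append_assoc]

-- ===== VERDICT (by name: the statement is the Claim_ definition above) =====
theorem solve_spec : Claim_equal_solve := by
  intro s _
  unfold Spec_solve solve solve_alt
  simp only
  have hfill := fillA_correct s.toList
  have hloop := loopA_correct s.toList (solveFillA s.toList (s.toList.length : Int)) hfill
    s.toList.length 0 ((s.toList.length : Int) - 1) [] le_rfl (by omega) (by omega)
  have hbuild := (buildB_correct_aux s.toList ((((s.toList.length : Int) - 1) - 0).toNat)
    0 ((s.toList.length : Int) - 1) PySem.Dict.empty le_rfl (goodMemo_empty _)).1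
  rw [hbuild]
  rw [← apply_ite String.ofList]
  rw [hloop]
  simp
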